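-- pv_equiv track=rewrite | github.com/ArtistGodGun/shaker | shaker/common.py | setMelodyOctav
-- ===== SOURCE A (Python) =====
-- def setMelodyOctav(melody_info):
--     temp = []
--     for i in melody_info:
--         temp.append(i[0])
--     octav = 12
--     repeat = True
--     while repeat:
--         if max(temp) + octav <= 76:
--             octav +=12
--         else:
--             for i in melody_info:
--                 i[0] = i[0] + octav
--             repeat = False
--     return melody_info
-- ===== SOURCE B (Python) =====
-- def setMelodyOctav(melody_info):
--     m = max(i[0] for i in melody_info)
--     octav = max(12, 12 * -((m - 77) // 12))
--     for i in melody_info: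
--         i[0] += octav
--     return melody_info
-- ===== Notes on version B (the rewrite author's own statement) =====
-- stated objective: simpler
-- what changed: Replaced A's trial-increment while loop (try octav=12,24,... until max+octav>76) by a direct closed-form octave octav = max(12, 12*-((m-77)//12)) computed with one ceiling division, then a single pass adding it to each row's first element.
import Mathlib
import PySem

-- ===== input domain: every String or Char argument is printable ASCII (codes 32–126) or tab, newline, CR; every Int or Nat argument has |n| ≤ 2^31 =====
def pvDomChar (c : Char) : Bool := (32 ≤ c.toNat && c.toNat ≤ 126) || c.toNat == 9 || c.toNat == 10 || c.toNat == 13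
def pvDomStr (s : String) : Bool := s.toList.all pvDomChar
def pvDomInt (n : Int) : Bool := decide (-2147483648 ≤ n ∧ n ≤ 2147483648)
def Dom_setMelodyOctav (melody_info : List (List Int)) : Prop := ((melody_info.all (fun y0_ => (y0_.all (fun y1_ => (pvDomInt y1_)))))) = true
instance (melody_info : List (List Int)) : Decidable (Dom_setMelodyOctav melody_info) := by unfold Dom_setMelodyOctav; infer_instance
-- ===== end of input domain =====

-- B replaces A's trial-increment while loop by a closed-form ceiling-division octave
-- (objective: simpler). Both Pythons mutate melody_info in place; the equivalence
-- proved here is about the return value (B performs the same mutation).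

-- ===== PORT A =====
-- A's while loop: keep trying octav, octav+12, … until max + octav > 76, then add
-- octav to each row's first element (Python does it by in-place mutation; the map
-- returns the same rows).
def setMelodyOctavLoop (melody_info : List (List Int)) (m octav : Int) : List (List Int) :=
  if m + octav ≤ 76 then
    setMelodyOctavLoop melody_info m (octav + 12)
  else
    melody_info.map (fun i => match i with | [] => [] | x :: r => (x + octav) :: r)
termination_by (77 - (m + octav)).toNat
decreasing_by omega

def setMelodyOctav (melody_info : List (List Int)) : List (List Int) :=
  let temp := melody_info.map (fun i => i.headD 0)   -- i[0]; Pre_ excludes empty rows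
  match PySem.List.max? temp (fun x => x) with       -- max(temp); none = ValueError, excluded by Pre_
  | none => []
  | some m => setMelodyOctavLoop melody_info m 12

-- ===== PORT B =====
def setMelodyOctav_alt (melody_info : List (List Int)) : List (List Int) :=
  match PySem.List.max? (melody_info.map (fun i => i.headD 0)) (fun x => x) with  -- max(i[0] for i in melody_info)
  | none => []                                        -- ValueError, excluded by Pre_
  | some m =>
    let octav := max 12 (12 * (-(PySem.Int.floordiv (m - 77) 12)))
    melody_info.map (fun i => match i with | [] => [] | x :: r => (x + octav) :: r)

-- ===== PRECONDITION & SPEC =====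
-- Pre_ excludes the empty list (max([]) raises ValueError in A) and rows with no
-- elements (i[0] raises IndexError in A); on all other inputs A returns normally.
def Pre_setMelodyOctav (melody_info : List (List Int)) : Prop :=
  melody_info ≠ [] ∧ ∀ i ∈ melody_info, i ≠ []
instance (melody_info : List (List Int)) : Decidable (Pre_setMelodyOctav melody_info) := by
  unfold Pre_setMelodyOctav; infer_instance

def pvWitness_setMelodyOctav : List (List Int) := [[60, 1], [64, 2]]

def Spec_setMelodyOctav (melody_info : List (List Int)) (out : List (List Int)) : Prop := out = setMelodyOctav_alt melody_info
instance (melody_info : List (List Int)) (out : List (List Int)) : Decidable (Spec_setMelodyOctav melody_info out) := by unfold Spec_setMelodyOctav; infer_instance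

-- ===== CLAIM (what is proved, stated in full; the proofs are below) =====
def Claim_equal_setMelodyOctav : Prop := ∀ (melody_info : List (List Int)), Dom_setMelodyOctav melody_info → Pre_setMelodyOctav melody_info → Spec_setMelodyOctav melody_info (setMelodyOctav melody_info)

-- ===== LEMMAS AND PROOFS =====

-- A's loop lands exactly on O, the value B computes, provided octav approaches O
-- from below in steps of 12.
theorem setMelodyOctavLoop_eq (n : Nat) (mel : List (List Int)) (m octav O : Int)
    (hO2 : 76 < m + O) (hO3 : m + O - 12 ≤ 76 ∨ O = 12)
    (h1 : 12 ≤ octav) (h2 : (12 : Int) ∣ (O - octav)) (h3 : octav ≤ O)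
    (hn : (O - octav).toNat ≤ n) :
    setMelodyOctavLoop mel m octav
      = mel.map (fun i => match i with | [] => [] | x :: r => (x + O) :: r) := by
  induction n generalizing octav with
  | zero =>
    have heq : octav = O := by omega
    subst heq
    rw [setMelodyOctavLoop, if_neg (by omega)]
  | succ k ih =>
    rw [setMelodyOctavLoop]
    by_cases h : m + octav ≤ 76
    · rw [if_pos h]
      have hne : octav ≠ O := by omega
      obtain ⟨c, hc⟩ := h2
      have hstep : octav + 12 ≤ O := by omega
      exact ih (octav + 12) (by omega) (by omega) hstep (by omega)
    · rw [if_neg h]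
      -- octav = O: otherwise octav ≤ O - 12 and m + octav ≤ m + O - 12 ≤ 76
      obtain ⟨c, hc⟩ := h2
      have heq : octav = O := by
        rcases hO3 with h3' | h3' <;> omega
      rw [heq]

theorem setMelodyOctav_spec' (melody_info : List (List Int))
    (hpre : Pre_setMelodyOctav melody_info) :
    setMelodyOctav melody_info = setMelodyOctav_alt melody_info := by
  obtain ⟨hne, -⟩ := hpre
  unfold setMelodyOctav setMelodyOctav_alt
  cases hmax : PySem.List.max? (melody_info.map (fun i => i.headD 0)) (fun x => x) with
  | none =>
    rw [PySem.List.max?_eq_none_iff, List.map_eq_nil_iff] at hmax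
    exact absurd hmax hne
  | some m =>
    simp only [hmax]
    -- arithmetic facts about B's closed-form octave O
    set O : Int := max 12 (12 * (-(PySem.Int.floordiv (m - 77) 12))) with hOdef
    have hdiv : PySem.Int.floordiv (m - 77) 12 = (m - 77) / 12 :=
      PySem.Int.floordiv_eq_ediv_of_pos (by norm_num)
    have hqr : 12 * ((m - 77) / 12) + (m - 77) % 12 = m - 77 := Int.mul_ediv_add_emod _ _
    have hr0 : 0 ≤ (m - 77) % 12 := Int.emod_nonneg _ (by norm_num)
    have hr1 : (m - 77) % 12 < 12 := Int.emod_lt_of_pos _ (by norm_num)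
    have hO2 : 76 < m + O := by
      rw [hOdef, hdiv]; omega
    have hO3 : m + O - 12 ≤ 76 ∨ O = 12 := by
      rw [hOdef, hdiv]
      by_cases h : 12 * (-((m - 77) / 12)) ≤ 12
      · right; omega
      · left; omega
    have hdvd : (12 : Int) ∣ (O - 12) := by
      rw [hOdef]
      rcases max_choice (12 : Int) (12 * (-(PySem.Int.floordiv (m - 77) 12))) with h | h <;>
        rw [h]
      · exact ⟨0, by ring⟩
      · exact ⟨-(PySem.Int.floordiv (m - 77) 12) - 1, by ring⟩
    have hO1 : 12 ≤ O := le_max_left _ _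
    exact setMelodyOctavLoop_eq (O - 12).toNat melody_info m 12 O hO2 hO3 le_rfl hdvd hO1 (by omega)

-- ===== VERDICT (by name: the statement is the Claim_ definition above) =====
theorem setMelodyOctav_spec : Claim_equal_setMelodyOctav := by
  intro melody_info _ hpre
  exact setMelodyOctav_spec' melody_info hpre
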